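-- pv_equiv track=rewrite | github.com/samscarrow/music-arranger | tools/train.py | _reorder_event
-- ===== SOURCE A (Python) =====
-- def _reorder_event(event_tokens):
--     """
--     Reorder tokens within a single event to melody-first order.
--
--     Priority:
--       1. [bar:N]      - position
--       2. [lead:M]     - melodic constraint (INPUT)
--       3. [dur:F]      - duration (INPUT)
--       4. [chord:X]    - chord to predict (OUTPUT)
--       5. [bass:M]     - bass to predict (OUTPUT)
--       6. [bari:M]     - baritone to predict (OUTPUT)
--       7. [tenor:M]    - tenor to predict (OUTPUT)
--
--     Returns reordered list of tokens.
--     """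
--     order_priority = {
--         'bar': 0,
--         'lead': 1,
--         'dur': 2,
--         'chord': 3,
--         'bass': 4,
--         'bari': 5,
--         'tenor': 6,
--     }
--
--     def get_sort_key(token):
--         for key, priority in order_priority.items():
--             if f'[{key}:' in token:
--                 return priority
--         return 99  # Unknown token to end
--
--     return sorted(event_tokens, key=get_sort_key)
-- ===== SOURCE B (Python) =====
-- def _reorder_event(event_tokens):
--     """Single-pass bucket reorder (no sorting): append each token to the bucket of the
--     first matching category marker, then concatenate buckets in priority
--     order with unknown tokens last."""
--     categories = ['bar', 'lead', 'dur', 'chord', 'bass', 'bari', 'tenor']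
--
--     def category_rank(token):
--         for i, name in enumerate(categories):
--             if f'[{name}:' in token:
--                 return i
--         return len(categories)
--
--     buckets = [[] for _ in range(len(categories) + 1)]
--     for token in event_tokens:
--         buckets[category_rank(token)].append(token)
--     return [tok for bucket in buckets for tok in bucket]
-- ===== Notes on version B (the rewrite author's own statement) =====
-- stated objective: alternative
-- what changed: Replaces sorted() with a comparison key by a single-pass bucket sort: each token is appended to the bucket of its first matching category marker and the eight buckets are concatenated in priority order, unknown tokens last.
import Mathlib
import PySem

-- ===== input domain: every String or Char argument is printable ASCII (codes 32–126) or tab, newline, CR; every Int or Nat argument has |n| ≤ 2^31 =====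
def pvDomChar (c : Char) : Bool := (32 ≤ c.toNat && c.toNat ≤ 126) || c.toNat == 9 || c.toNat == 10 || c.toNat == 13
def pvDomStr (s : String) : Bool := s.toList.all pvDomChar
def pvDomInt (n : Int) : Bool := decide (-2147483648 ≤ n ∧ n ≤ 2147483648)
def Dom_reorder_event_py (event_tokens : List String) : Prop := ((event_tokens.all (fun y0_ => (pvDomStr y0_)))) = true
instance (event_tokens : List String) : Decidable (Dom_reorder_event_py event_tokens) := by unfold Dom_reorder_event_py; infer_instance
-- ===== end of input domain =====

-- ===== PORT A =====
-- B changes the algorithm: one bucket pass instead of sorted() with a key (alternative decomposition, same cost).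
-- order_priority dict (assoc list in insertion order)
def pvOrderPriority : List (String × Int) :=
  [("bar", 0), ("lead", 1), ("dur", 2), ("chord", 3), ("bass", 4), ("bari", 5), ("tenor", 6)]

-- get_sort_key: first (key, priority) whose '[key:' is in token; 99 otherwise
def pvGetSortKeyGo : List (String × Int) → List Char → Int
  | [], _ => 99
  | (k, p) :: rest, tok =>
      if PySem.Chars.isIn ('[' :: k.toList ++ [':']) tok then p else pvGetSortKeyGo rest tok

def pvGetSortKey (token : String) : Int := pvGetSortKeyGo pvOrderPriority token.toList

def reorder_event_py (event_tokens : List String) : List String :=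
  PySem.List.sorted event_tokens pvGetSortKey

-- ===== PORT B =====
def pvCategories : List String := ["bar", "lead", "dur", "chord", "bass", "bari", "tenor"]

-- category_rank: index of the first matching category; len(categories) = 7 if none
def pvCategoryRankGo : List String → Nat → List Char → Nat
  | [], i, _ => i
  | c :: rest, i, tok =>
      if PySem.Chars.isIn ('[' :: c.toList ++ [':']) tok then i else pvCategoryRankGo rest (i + 1) tok

def pvCategoryRank (token : String) : Nat := pvCategoryRankGo pvCategories 0 token.toList

def reorder_event_py_alt (event_tokens : List String) : List String :=
  let buckets :=
    event_tokens.foldl (fun bs t => bs.modify (pvCategoryRank t) (· ++ [t]))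
      (List.replicate (pvCategories.length + 1) [])
  buckets.flatMap id

-- ===== PRECONDITION & SPEC =====
def Spec_reorder_event_py (event_tokens : List String) (out : List String) : Prop := out = reorder_event_py_alt event_tokens
instance (event_tokens : List String) (out : List String) : Decidable (Spec_reorder_event_py event_tokens out) := by unfold Spec_reorder_event_py; infer_instance

-- ===== CLAIM (what is proved, stated in full; the proofs are below) =====
def Claim_equal_reorder_event_py : Prop := ∀ (event_tokens : List String), Dom_reorder_event_py event_tokens → Spec_reorder_event_py event_tokens (reorder_event_py event_tokens)

-- ===== LEMMAS AND PROOFS =====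

-- get_sort_key is determined by category_rank
def pvKeyOf (i : Nat) : Int := if i = 7 then 99 else (i : Int)

lemma pvKey_eq_rank (t : String) : pvGetSortKey t = pvKeyOf (pvCategoryRank t) := by
  simp only [pvGetSortKey, pvCategoryRank, pvOrderPriority, pvCategories,
    pvGetSortKeyGo, pvCategoryRankGo, pvKeyOf]
  split_ifs <;> first | rfl | omega | simp_all

lemma pvRank_le (t : String) : pvCategoryRank t ≤ 7 := by
  simp only [pvCategoryRank, pvCategories, pvCategoryRankGo]
  split_ifs <;> omega

-- insertBy facts
lemma pvInsertBy_cons {α : Type} (before : α → α → Bool) (x y : α) (ys : List α) :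
    PySem.List.insertBy before x (y :: ys) =
      if before x y then x :: y :: ys else y :: PySem.List.insertBy before x ys := rfl

lemma pvInsertBy_append_left {α : Type} (before : α → α → Bool) (x : α) (l1 l2 : List α)
    (h : ∀ y ∈ l1, before x y = false) :
    PySem.List.insertBy before x (l1 ++ l2) = l1 ++ PySem.List.insertBy before x l2 := by
  induction l1 with
  | nil => simp
  | cons y t ih =>
      rw [List.cons_append, pvInsertBy_cons, h y (by simp)]
      simp only [Bool.false_eq_true, if_false]
      rw [ih (fun z hz => h z (by simp [hz])), List.cons_append]

lemma pvInsertBy_all_true {α : Type} (before : α → α → Bool) (x : α) (l : List α)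
    (h : ∀ y ∈ l, before x y = true) :
    PySem.List.insertBy before x l = x :: l := by
  cases l with
  | nil => rfl
  | cons y t => simp [pvInsertBy_cons, h y (by simp)]

-- the filter-concat target shape
def pvF (vals : List Int) (key : String → Int) (ys : List String) : List String :=
  vals.flatMap (fun v => ys.filter (fun t => decide (key t = v)))

lemma pvMem_F_key {vals : List Int} {key : String → Int} {ys : List String} {y : String}
    (h : y ∈ pvF vals key ys) : key y ∈ vals := by
  simp only [pvF, List.mem_flatMap, List.mem_filter] at h
  obtain ⟨v, hv, _, hk⟩ := h
  simp at hk; rw [hk]; exact hv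

lemma pvF_append_not_mem {vals : List Int} {key : String → Int} {ys : List String} {x : String}
    (h : key x ∉ vals) : pvF vals key (ys ++ [x]) = pvF vals key ys := by
  unfold pvF
  apply List.flatMap_congr
  intro v hv
  rw [List.filter_append]
  have : (List.filter (fun t => decide (key t = v)) [x]) = [] := by
    simp only [List.filter]
    have : key x ≠ v := fun he => h (he ▸ hv)
    simp [this]
  simp [this]

lemma pvStep (vals : List Int) (key : String → Int) (x : String) (ys : List String)
    (hp : vals.Pairwise (· < ·)) (hx : key x ∈ vals) :
    PySem.List.insertBy (fun a b => decide (key a < key b)) x (pvF vals key ys) =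
      pvF vals key (ys ++ [x]) := by
  induction vals with
  | nil => simp at hx
  | cons v vs ih =>
      have hlt : ∀ w ∈ vs, v < w := (List.pairwise_cons.mp hp).1
      have hpp : vs.Pairwise (· < ·) := (List.pairwise_cons.mp hp).2
      simp only [pvF, List.flatMap_cons] at *
      rcases List.mem_cons.mp hx with hkv | hkvs
      · -- key x = v: insert right after the v-bucket
        rw [pvInsertBy_append_left _ _ _ _ (by
          intro y hy
          have : key y = v := by simpa using (List.mem_filter.mp hy).2
          simp [this, hkv])]
        rw [pvInsertBy_all_true _ _ _ (by
          intro y hy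
          have hk : key y ∈ vs := pvMem_F_key (vals := vs) (key := key) (ys := ys) hy
          simp [hkv]; exact hlt _ hk)]
        have hnv : key x ∉ vs := by
          rw [hkv]; intro hmem; exact absurd (hlt _ hmem) (lt_irrefl v)
        have h2 : pvF vs key (ys ++ [x]) = pvF vs key ys := pvF_append_not_mem hnv
        unfold pvF at h2
        rw [h2, List.filter_append]
        have : (List.filter (fun t => decide (key t = v)) [x]) = [x] := by simp [hkv]
        simp [this]
      · -- key x in vs, v < key x: skip the v-bucket
        have hvx : v < key x := hlt _ hkvs
        rw [pvInsertBy_append_left _ _ _ _ (by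
          intro y hy
          have : key y = v := by simpa using (List.mem_filter.mp hy).2
          simp [this]; omega)]
        rw [ih hpp hkvs]
        have hne : key x ≠ v := by omega
        rw [List.filter_append]
        have : (List.filter (fun t => decide (key t = v)) [x]) = [] := by simp [hne]
        simp [this]

lemma pvFoldl_ins (vals : List Int) (key : String → Int)
    (hp : vals.Pairwise (· < ·)) (hall : ∀ t, key t ∈ vals) :
    ∀ (xs ys : List String),
      xs.foldl (fun acc x => PySem.List.insertBy (fun a b => decide (key a < key b)) x acc)
        (pvF vals key ys) = pvF vals key (ys ++ xs) := by
  intro xs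
  induction xs with
  | nil => intro ys; simp
  | cons x t ih =>
      intro ys
      simp only [List.foldl_cons]
      rw [pvStep vals key x ys hp (hall x), ih (ys ++ [x])]
      simp

lemma pvSorted_eq_F (vals : List Int) (key : String → Int)
    (hp : vals.Pairwise (· < ·)) (hall : ∀ t, key t ∈ vals) (xs : List String) :
    PySem.List.sorted xs key = pvF vals key xs := by
  rw [PySem.List.sorted_eq_foldl_insertBy]
  have h0 : pvF vals key [] = [] := by simp [pvF]
  have := pvFoldl_ins vals key hp hall xs []
  rw [h0] at this
  simpa using this

-- B-side: bucket contents after the fold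
lemma pvBuckets_getElem? (xs : List String) :
    ∀ (bs : List (List String)) (i : Nat),
      (xs.foldl (fun bs t => bs.modify (pvCategoryRank t) (· ++ [t])) bs)[i]? =
        (bs[i]?).map (fun b => b ++ xs.filter (fun t => decide (pvCategoryRank t = i))) := by
  induction xs with
  | nil => intro bs i; cases h : bs[i]? <;> simp [h]
  | cons x t ih =>
      intro bs i
      simp only [List.foldl_cons]
      rw [ih]
      rw [List.getElem?_modify]
      by_cases hx : pvCategoryRank x = i
      · cases hbs : bs[i]? <;> simp [hx, List.append_assoc]
      · cases hbs : bs[i]? <;> simp [hx]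

-- key values cover exactly pvKeyOf 0..7 and pvKeyOf is injective there
lemma pvKey_mem (t : String) :
    pvGetSortKey t ∈ [(0 : Int), 1, 2, 3, 4, 5, 6, 99] := by
  rw [pvKey_eq_rank]
  have h := pvRank_le t
  interval_cases (pvCategoryRank t) <;> simp [pvKeyOf]

lemma pvFilter_key_eq (xs : List String) (i : Nat) (hi : i < 8) :
    xs.filter (fun t => decide (pvGetSortKey t = pvKeyOf i)) =
      xs.filter (fun t => decide (pvCategoryRank t = i)) := by
  apply List.filter_congr
  intro t _
  rw [pvKey_eq_rank]
  have h := pvRank_le t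
  simp only [decide_eq_decide]
  interval_cases (pvCategoryRank t) <;> interval_cases i <;> simp [pvKeyOf]

-- ===== VERDICT (by name: the statement is the Claim_ definition above) =====
theorem reorder_event_py_spec : Claim_equal_reorder_event_py := by
  intro xs _
  unfold Spec_reorder_event_py
  -- A side: stable sort = concatenation of the key-value buckets
  have hA : reorder_event_py xs = pvF [(0 : Int), 1, 2, 3, 4, 5, 6, 99] pvGetSortKey xs := by
    unfold reorder_event_py
    exact pvSorted_eq_F _ _ (by decide) pvKey_mem xs
  -- B side: the fold fills bucket i with exactly the rank-i tokens
  have hspec : ∀ i : Nat,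
      (xs.foldl (fun bs t => bs.modify (pvCategoryRank t) (· ++ [t]))
        (List.replicate 8 ([] : List String)))[i]? =
        (List.replicate 8 ([] : List String))[i]?.map
          (fun b => b ++ xs.filter (fun t => decide (pvCategoryRank t = i))) :=
    fun i => pvBuckets_getElem? xs (List.replicate 8 []) i
  have hb : (xs.foldl (fun bs t => bs.modify (pvCategoryRank t) (· ++ [t]))
      (List.replicate 8 ([] : List String))) =
      [xs.filter (fun t => decide (pvCategoryRank t = 0)),
       xs.filter (fun t => decide (pvCategoryRank t = 1)),
       xs.filter (fun t => decide (pvCategoryRank t = 2)),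
       xs.filter (fun t => decide (pvCategoryRank t = 3)),
       xs.filter (fun t => decide (pvCategoryRank t = 4)),
       xs.filter (fun t => decide (pvCategoryRank t = 5)),
       xs.filter (fun t => decide (pvCategoryRank t = 6)),
       xs.filter (fun t => decide (pvCategoryRank t = 7))] := by
    apply List.ext_getElem?
    intro i
    rw [hspec i]
    by_cases hi : i < 8
    · interval_cases i <;> simp
    · have h8 : (8 : Nat) ≤ i := by omega
      rw [List.getElem?_eq_none (by simpa using h8),
          List.getElem?_eq_none (by simp; omega)]
      rfl
  have hB : reorder_event_py_alt xs =
      xs.filter (fun t => decide (pvCategoryRank t = 0)) ++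
      xs.filter (fun t => decide (pvCategoryRank t = 1)) ++
      xs.filter (fun t => decide (pvCategoryRank t = 2)) ++
      xs.filter (fun t => decide (pvCategoryRank t = 3)) ++
      xs.filter (fun t => decide (pvCategoryRank t = 4)) ++
      xs.filter (fun t => decide (pvCategoryRank t = 5)) ++
      xs.filter (fun t => decide (pvCategoryRank t = 6)) ++
      xs.filter (fun t => decide (pvCategoryRank t = 7)) := by
    unfold reorder_event_py_alt
    simp only [pvCategories, List.length_cons, List.length_nil]
    rw [show (0 + 1 + 1 + 1 + 1 + 1 + 1 + 1 + 1 : Nat) = 8 from rfl] at *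
    rw [hb]
    simp [List.flatMap, List.append_assoc]
  rw [hA, hB]
  have hv : ([(0 : Int), 1, 2, 3, 4, 5, 6, 99] : List Int) =
      [pvKeyOf 0, pvKeyOf 1, pvKeyOf 2, pvKeyOf 3, pvKeyOf 4, pvKeyOf 5, pvKeyOf 6, pvKeyOf 7] := by
    decide
  rw [hv]
  simp only [pvF, List.flatMap_cons, List.flatMap_nil, List.append_nil]
  rw [pvFilter_key_eq xs 0 (by omega), pvFilter_key_eq xs 1 (by omega),
      pvFilter_key_eq xs 2 (by omega), pvFilter_key_eq xs 3 (by omega),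
      pvFilter_key_eq xs 4 (by omega), pvFilter_key_eq xs 5 (by omega),
      pvFilter_key_eq xs 6 (by omega), pvFilter_key_eq xs 7 (by omega)]
  simp [List.append_assoc]
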